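-- pv_equiv track=rewrite | github.com/weisscoffee07-commits/witchess | rc522.py | data_to_hex
-- ===== SOURCE A (Python) =====
-- def data_to_hex(user_data):
--     """Конвертация данных в HEX строку"""
--     if not user_data:
--         return ""
--
--     all_bytes = bytearray()
--     for page in sorted(user_data.keys()):
--         all_bytes.extend(user_data[page])
--
--     hex_str = ""
--     for i, byte in enumerate(all_bytes):
--         if i > 0 and i % 16 == 0:
--             hex_str += "\n"
--         hex_str += f"{byte:02X} "
--
--     return hex_str.strip()
-- ===== SOURCE B (Python) =====
-- def data_to_hex(user_data):
--     """Конвертация данных в HEX строку"""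
--     all_bytes = b"".join(bytes(user_data[page]) for page in sorted(user_data))
--     tokens = [f"{b:02X} " for b in all_bytes]
--     lines = ["".join(tokens[i:i + 16]) for i in range(0, len(tokens), 16)]
--     return "\n".join(lines).strip()
-- ===== Notes on version B (the rewrite author's own statement) =====
-- stated objective: alternative
-- what changed: The single stateful scan with a running i%16 newline test is replaced by a build-then-chunk-then-join pipeline: collect the bytes with b''.join over the sorted pages, map them to fixed three-character tokens, slice the token list into groups of 16 via a stepped range, join each group, join the lines with newlines, and strip; the empty-dict early return disappears (the pipeline yields "" naturally).
import Mathlib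
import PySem

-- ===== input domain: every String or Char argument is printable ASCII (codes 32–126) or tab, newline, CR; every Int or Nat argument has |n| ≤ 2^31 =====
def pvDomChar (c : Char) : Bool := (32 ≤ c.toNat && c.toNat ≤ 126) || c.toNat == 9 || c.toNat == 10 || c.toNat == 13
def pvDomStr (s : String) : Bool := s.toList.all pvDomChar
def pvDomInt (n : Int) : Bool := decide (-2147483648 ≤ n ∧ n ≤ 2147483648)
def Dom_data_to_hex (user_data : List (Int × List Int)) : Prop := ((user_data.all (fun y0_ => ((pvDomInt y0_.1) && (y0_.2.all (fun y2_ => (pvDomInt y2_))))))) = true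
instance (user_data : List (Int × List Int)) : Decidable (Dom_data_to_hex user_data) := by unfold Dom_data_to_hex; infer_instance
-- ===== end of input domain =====

-- B replaces A's stateful scan (running index, i%16 newline test) by a map-chunk-join pipeline; objective: alternative (same cost).

-- ===== PORT A =====
-- hand port of the f-string f"{b:02X}" (uppercase hex, zero-padded to min width 2, sign
-- counted in the width), exact for every int; used by both Pythons
def pvHexDigit (n : Nat) : Char :=
  ['0','1','2','3','4','5','6','7','8','9','A','B','C','D','E','F'].getD n '0'
def pvHexCore (n : Nat) : List Char :=
  if n = 0 then [] else pvHexCore (n / 16) ++ [pvHexDigit (n % 16)]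
termination_by n
decreasing_by exact Nat.div_lt_self (Nat.pos_of_ne_zero (by assumption)) (by norm_num)
def pvHexDigits (n : Nat) : List Char :=
  if n = 0 then ['0'] else pvHexCore n
def pvHex02 (b : Int) : List Char :=
  if b < 0 then '-' :: pvHexDigits b.natAbs
  else if (pvHexDigits b.natAbs).length < 2 then '0' :: pvHexDigits b.natAbs
  else pvHexDigits b.natAbs
def pvTok (b : Int) : List Char := pvHex02 b ++ [' ']

def data_to_hex (user_data : List (Int × List Int)) : String :=
  let d := PySem.Dict.ofList user_data
  if d.items.isEmpty then "" else
    let allBytes : List Int :=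
      (PySem.List.sorted d.keys (fun k => k) false).foldl (fun acc page => acc ++ d.getD page []) []
    let hexStr : List Char :=
      (PySem.List.enumerate allBytes 0).foldl
        (fun s p => (if 0 < p.1 ∧ PySem.Int.mod p.1 16 = 0 then s ++ ['\n'] else s) ++ pvTok p.2) []
    String.ofList (PySem.Chars.strip hexStr)

-- ===== PORT B =====
def data_to_hex_alt (user_data : List (Int × List Int)) : String :=
  let d := PySem.Dict.ofList user_data
  let allBytes : List Int :=
    (PySem.List.sorted d.keys (fun k => k) false).flatMap (fun page => d.getD page [])
  let tokens : List (List Char) := allBytes.map pvTok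
  let lines : List (List Char) :=
    (PySem.List.pyRange 0 (tokens.length : Int) 16).map
      (fun i => PySem.Chars.join [] (PySem.List.slice tokens (some i) (some (i + 16))))
  String.ofList (PySem.Chars.strip (PySem.Chars.join ['\n'] lines))

-- ===== PRECONDITION & SPEC =====
-- Pre_ excludes exactly the inputs on which A raises: bytearray.extend raises ValueError
-- when some value of the dict contains an integer outside 0..255.
def Pre_data_to_hex (user_data : List (Int × List Int)) : Prop :=
  ∀ v ∈ (PySem.Dict.ofList user_data).values, ∀ b ∈ v, 0 ≤ b ∧ b ≤ 255
instance (user_data : List (Int × List Int)) : Decidable (Pre_data_to_hex user_data) := by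
  unfold Pre_data_to_hex; infer_instance
def pvWitness_data_to_hex : (List (Int × List Int)) := [(4, [0, 17, 255]), (3, [1])]

def Spec_data_to_hex (user_data : List (Int × List Int)) (out : String) : Prop := out = data_to_hex_alt user_data
instance (user_data : List (Int × List Int)) (out : String) : Decidable (Spec_data_to_hex user_data out) := by unfold Spec_data_to_hex; infer_instance

-- ===== CLAIM (what is proved, stated in full; the proofs are below) =====
def Claim_equal_data_to_hex : Prop := ∀ (user_data : List (Int × List Int)), Dom_data_to_hex user_data → Pre_data_to_hex user_data → Spec_data_to_hex user_data (data_to_hex user_data)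

-- ===== LEMMAS AND PROOFS =====

-- chunks of 16, the common normal form of both renderings
def pvChunks {α : Type} (l : List α) : List (List α) :=
  if h : l = [] then [] else l.take 16 :: pvChunks (l.drop 16)
termination_by l.length
decreasing_by
  have : 0 < l.length := List.length_pos_iff.mpr h
  simp; omega

def pvLine (c : List Int) : List Char := (c.map pvTok).flatten
def pvTail (bs : List Int) : List Char := ((pvChunks bs).map (fun c => '\n' :: pvLine c)).flatten
def pvBody (bs : List Int) : List Char :=
  match pvChunks bs with
  | [] => []
  | c :: rest => pvLine c ++ (rest.map (fun c => '\n' :: pvLine c)).flatten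

theorem pvChunks_nil {α : Type} : pvChunks ([] : List α) = [] := by
  unfold pvChunks; simp

theorem pvChunks_cons {α : Type} (l : List α) (h : l ≠ []) :
    pvChunks l = l.take 16 :: pvChunks (l.drop 16) := by
  conv_lhs => unfold pvChunks
  simp [h]

-- A's loop over a stretch of indices none of which fires the newline test
theorem pvNoFire (c : List Int) (s : Int) (acc : List Char)
    (h : ∀ i : Int, s ≤ i → i < s + c.length → ¬(0 < i ∧ i % 16 = 0)) :
    (PySem.List.enumerate c s).foldl
      (fun s p => (if 0 < p.1 ∧ PySem.Int.mod p.1 16 = 0 then s ++ ['\n'] else s) ++ pvTok p.2) acc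
    = acc ++ pvLine c := by
  induction c generalizing s acc with
  | nil => simp [PySem.List.enumerate_nil, pvLine]
  | cons x xs ih =>
    rw [PySem.List.enumerate_cons]
    simp only [List.foldl_cons]
    have hc : ¬(0 < s ∧ PySem.Int.mod s 16 = 0) := by
      rw [PySem.Int.mod_eq_emod_of_pos (by norm_num)]
      exact h s le_rfl (by simp only [List.length_cons]; push_cast; omega)
    rw [if_neg hc, ih (s + 1) (acc ++ pvTok x)
      (fun i h1 h2 => h i (by omega) (by simp at h2 ⊢; omega))]
    simp [pvLine]

-- A's loop resumed at a positive multiple of 16: emits a newline before each chunk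
theorem pvTailA : ∀ (n : Nat) (bs : List Int), bs.length ≤ n → ∀ (s : Int) (acc : List Char),
    0 < s → s % 16 = 0 →
    (PySem.List.enumerate bs s).foldl
      (fun s p => (if 0 < p.1 ∧ PySem.Int.mod p.1 16 = 0 then s ++ ['\n'] else s) ++ pvTok p.2) acc
    = acc ++ pvTail bs := by
  intro n
  induction n with
  | zero =>
    intro bs hle s acc _ _
    have hbs : bs = [] := List.eq_nil_of_length_eq_zero (Nat.le_zero.mp hle)
    subst hbs
    simp [PySem.List.enumerate_nil, pvTail, pvChunks_nil]
  | succ n ih =>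
    intro bs hle s acc hs hmod
    by_cases hbs : bs = []
    · subst hbs
      simp [PySem.List.enumerate_nil, pvTail, pvChunks_nil]
    · conv_lhs => rw [show bs = bs.take 16 ++ bs.drop 16 from (List.take_append_drop 16 bs).symm]
      rw [PySem.List.enumerate_append, List.foldl_append]
      obtain ⟨x, c', htake⟩ : ∃ x c', bs.take 16 = x :: c' := by
        cases h16 : bs.take 16 with
        | nil => exact absurd (by simpa using h16) hbs
        | cons a b => exact ⟨a, b, rfl⟩
      rw [htake, PySem.List.enumerate_cons]
      simp only [List.foldl_cons]
      have hcond : (0 < s ∧ PySem.Int.mod s 16 = 0) :=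
        ⟨hs, by rw [PySem.Int.mod_eq_emod_of_pos (by norm_num)]; exact hmod⟩
      rw [if_pos hcond]
      have hc'len : c'.length ≤ 15 := by
        have h1 : (bs.take 16).length ≤ 16 := by
          rw [List.length_take]; omega
        rw [htake] at h1; simp at h1; omega
      have hc'lenI : (c'.length : Int) ≤ 15 := by exact_mod_cast hc'len
      rw [pvNoFire c' (s + 1) _ (fun i h1 h2 => by
        rintro ⟨hpos, hm⟩
        omega)]
      by_cases hdrop : bs.drop 16 = []
      · rw [hdrop, PySem.List.enumerate_nil]
        simp only [List.foldl_nil]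
        rw [pvTail, pvChunks_cons bs hbs, hdrop, pvChunks_nil, htake]
        simp [pvLine]
      · have h16le : 16 ≤ bs.length := by
          by_contra hlt
          exact hdrop (List.drop_eq_nil_of_le (by omega))
        have h16len : (bs.take 16).length = 16 := by
          rw [List.length_take]; omega
        rw [htake] at h16len
        rw [h16len]
        rw [ih (bs.drop 16) (by rw [List.length_drop]; omega) (s + (16:Nat)) _
          (by push_cast; omega) (by push_cast; omega)]
        rw [pvTail, pvTail, pvChunks_cons bs hbs, htake]
        simp [pvLine]

-- A's whole rendering loop computes pvBody
theorem pvBodyA (bs : List Int) :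
    (PySem.List.enumerate bs 0).foldl
      (fun s p => (if 0 < p.1 ∧ PySem.Int.mod p.1 16 = 0 then s ++ ['\n'] else s) ++ pvTok p.2) []
    = pvBody bs := by
  by_cases hbs : bs = []
  · subst hbs
    simp [PySem.List.enumerate_nil, pvBody, pvChunks_nil]
  · conv_lhs => rw [show bs = bs.take 16 ++ bs.drop 16 from (List.take_append_drop 16 bs).symm]
    rw [PySem.List.enumerate_append, List.foldl_append]
    obtain ⟨x, c', htake⟩ : ∃ x c', bs.take 16 = x :: c' := by
      cases h16 : bs.take 16 with
      | nil => exact absurd (by simpa using h16) hbs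
      | cons a b => exact ⟨a, b, rfl⟩
    rw [htake, PySem.List.enumerate_cons]
    simp only [List.foldl_cons]
    rw [if_neg (by rintro ⟨hpos, _⟩; omega)]
    have hc'len : c'.length ≤ 15 := by
      have h1 : (bs.take 16).length ≤ 16 := by
        rw [List.length_take]; omega
      rw [htake] at h1; simp at h1; omega
    have hc'lenI : (c'.length : Int) ≤ 15 := by exact_mod_cast hc'len
    rw [pvNoFire c' (0 + 1) _ (fun i h1 h2 => by rintro ⟨hpos, hm⟩; omega)]
    by_cases hdrop : bs.drop 16 = []
    · rw [hdrop, PySem.List.enumerate_nil]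
      simp only [List.foldl_nil]
      rw [pvBody, pvChunks_cons bs hbs, hdrop, pvChunks_nil, htake]
      simp [pvLine]
    · have h16le : 16 ≤ bs.length := by
        by_contra hlt
        exact hdrop (List.drop_eq_nil_of_le (by omega))
      have h16len : (bs.take 16).length = 16 := by
        rw [List.length_take]; omega
      rw [htake] at h16len
      rw [h16len]
      rw [pvTailA (bs.drop 16).length (bs.drop 16) le_rfl ((0:Int) + (16:Nat)) _
        (by norm_num) (by norm_num)]
      rw [pvBody, pvTail, pvChunks_cons bs hbs, htake]
      simp [pvLine]

theorem pvJoinEmptySep (ts : List (List Char)) : PySem.Chars.join [] ts = ts.flatten := by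
  induction ts with
  | nil => simp [PySem.Chars.join_nil]
  | cons p rest ih =>
    cases rest with
    | nil => simp [PySem.Chars.join_singleton]
    | cons q r =>
      rw [PySem.Chars.join_cons_cons, ih]
      simp

theorem pvSliceShift (ts : List (List Char)) (i : Int) (hi : 0 ≤ i) :
    PySem.List.slice ts (some (i + 16)) (some (i + 16 + 16))
      = PySem.List.slice (ts.drop 16) (some i) (some (i + 16)) := by
  rw [PySem.List.slice_toNat ts (by omega) (by omega),
      PySem.List.slice_toNat (ts.drop 16) hi (by omega)]
  have h1 : (i + 16).toNat = i.toNat + 16 := by omega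
  have h2 : (i + 16 + 16).toNat = i.toNat + 32 := by omega
  rw [h1, h2, List.drop_drop, Nat.add_comm 16 i.toNat]
  congr 1; omega

theorem pvRange16_cons (L : Int) (h : 0 < L) :
    PySem.List.pyRange 0 L 16 = 0 :: (PySem.List.pyRange 0 (L - 16) 16).map (· + 16) := by
  rw [PySem.List.pyRange_of_pos 0 L (by norm_num), PySem.List.pyRange_of_pos 0 (L - 16) (by norm_num)]
  have hcount : (if (0:Int) < L then ((L - 0 + 16 - 1) / 16).toNat else 0)
      = (if (0:Int) < L - 16 then ((L - 16 - 0 + 16 - 1) / 16).toNat else 0) + 1 := by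
    rw [if_pos h]
    split_ifs with h2
    · have e1 : L - 0 + 16 - 1 = (L - 16 - 0 + 16 - 1) + 1 * 16 := by ring
      rw [e1, Int.add_mul_ediv_right _ _ (by norm_num)]
      have h0 : 0 ≤ (L - 16 - 0 + 16 - 1) / 16 := Int.ediv_nonneg (by omega) (by norm_num)
      omega
    · have e1 : L - 0 + 16 - 1 = (L - 1) + 1 * 16 := by ring
      rw [e1, Int.add_mul_ediv_right _ _ (by norm_num)]
      have h0 : (L - 1) / 16 = 0 := Int.ediv_eq_zero_of_lt (by omega) (by omega)
      omega
  rw [hcount, List.range_succ_eq_map]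
  simp only [List.map_cons, List.map_map, Nat.cast_zero, mul_zero, add_zero]
  congr 1

theorem pvChunksB : ∀ (n : Nat) (ts : List (List Char)), ts.length ≤ n →
    (PySem.List.pyRange 0 (ts.length : Int) 16).map
      (fun i => PySem.List.slice ts (some i) (some (i + 16))) = pvChunks ts := by
  intro n
  induction n with
  | zero =>
    intro ts hle
    have hts : ts = [] := List.eq_nil_of_length_eq_zero (Nat.le_zero.mp hle)
    subst hts
    rw [pvChunks_nil]
    simp [PySem.List.pyRange_of_pos 0 0 (by norm_num : (0:Int) < 16)]
  | succ n ih =>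
    intro ts hle
    by_cases hts : ts = []
    · subst hts
      rw [pvChunks_nil]
      simp [PySem.List.pyRange_of_pos 0 0 (by norm_num : (0:Int) < 16)]
    · have hL : (0:Int) < (ts.length : Int) := by
        have := List.length_pos_iff.mpr hts
        exact_mod_cast this
      rw [pvRange16_cons _ hL, List.map_cons, List.map_map, pvChunks_cons ts hts]
      congr 1
      · rw [PySem.List.slice_toNat ts (by norm_num) (by norm_num)]
        norm_num
        rfl
      · have hcg : ∀ i ∈ PySem.List.pyRange 0 ((ts.length : Int) - 16) 16,
            ((fun i => PySem.List.slice ts (some i) (some (i + 16))) ∘ (· + 16)) i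
              = PySem.List.slice (ts.drop 16) (some i) (some (i + 16)) := by
          intro i hi
          have hi0 : 0 ≤ i := ((PySem.List.mem_pyRange_iff_of_pos (by norm_num) i).mp hi).1
          simpa using pvSliceShift ts i hi0
        rw [List.map_congr_left hcg]
        by_cases h16 : 16 ≤ ts.length
        · have hlen : ((ts.drop 16).length : Int) = (ts.length : Int) - 16 := by
            rw [List.length_drop]; omega
          rw [← hlen]
          exact ih (ts.drop 16) (by rw [List.length_drop]; omega)
        · have hdrop : ts.drop 16 = [] := List.drop_eq_nil_of_le (by omega)
          rw [hdrop, pvChunks_nil,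
            PySem.List.pyRange_of_pos 0 _ (by norm_num : (0:Int) < 16),
            if_neg (by omega)]
          simp

theorem pvChunks_map (bs : List Int) :
    pvChunks (bs.map pvTok) = (pvChunks bs).map (List.map pvTok) := by
  suffices h : ∀ (n : Nat) (bs : List Int), bs.length ≤ n →
      pvChunks (bs.map pvTok) = (pvChunks bs).map (List.map pvTok) from h bs.length bs le_rfl
  intro n
  induction n with
  | zero =>
    intro bs hle
    have hbs : bs = [] := List.eq_nil_of_length_eq_zero (Nat.le_zero.mp hle)
    subst hbs
    simp [pvChunks_nil]
  | succ n ih =>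
    intro bs hle
    by_cases hbs : bs = []
    · subst hbs
      simp [pvChunks_nil]
    · rw [pvChunks_cons bs hbs, pvChunks_cons (bs.map pvTok) (by simp [hbs])]
      rw [List.map_cons, ← List.map_take, ← List.map_drop]
      congr 1
      exact ih (bs.drop 16) (by rw [List.length_drop]; omega)

theorem pvJoinNL (ls : List (List Char)) :
    PySem.Chars.join ['\n'] ls =
      (match ls with
       | [] => []
       | l :: rest => l ++ (rest.map (fun c => '\n' :: c)).flatten) := by
  induction ls with
  | nil => simp [PySem.Chars.join_nil]
  | cons l rest ih =>
    cases rest with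
    | nil => simp [PySem.Chars.join_singleton]
    | cons q r =>
      rw [PySem.Chars.join_cons_cons, ih]
      simp

-- B's whole pipeline computes pvBody
theorem pvBodyB (bs : List Int) :
    PySem.Chars.join ['\n']
      ((PySem.List.pyRange 0 ((bs.map pvTok).length : Int) 16).map
        (fun i => PySem.Chars.join [] (PySem.List.slice (bs.map pvTok) (some i) (some (i + 16)))))
    = pvBody bs := by
  simp only [pvJoinEmptySep]
  rw [show (fun i => (PySem.List.slice (bs.map pvTok) (some i) (some (i + 16))).flatten)
      = (List.flatten ∘ fun i => PySem.List.slice (bs.map pvTok) (some i) (some (i + 16))) from rfl,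
    ← List.map_map, pvChunksB (bs.map pvTok).length (bs.map pvTok) le_rfl, pvChunks_map bs,
    List.map_map, pvJoinNL]
  cases hc : pvChunks bs with
  | nil => simp [pvBody, hc]
  | cons c rest =>
    simp only [pvBody, hc, List.map_cons, List.map_map]
    rfl

-- ===== VERDICT (by name: the statement is the Claim_ definition above) =====
theorem data_to_hex_spec : Claim_equal_data_to_hex := by
  unfold Claim_equal_data_to_hex
  intro u _ _
  unfold Spec_data_to_hex
  simp only [data_to_hex, data_to_hex_alt]
  by_cases hemp : (PySem.Dict.ofList u).items.isEmpty
  · rw [if_pos hemp]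
    have hitems : (PySem.Dict.ofList u).items = [] := by simpa using hemp
    have hkeys : (PySem.Dict.ofList u).keys = [] := by
      simp only [PySem.Dict.keys, hitems, List.map_nil]
    rw [hkeys]
    rw [show PySem.List.sorted ([] : List Int) (fun k => k) false = [] from
      (PySem.List.sorted_eq_nil_iff _ _ _).mpr rfl]
    simp [PySem.List.pyRange_of_pos 0 0 (by norm_num : (0:Int) < 16),
      PySem.Chars.join_nil]
    rfl
  · rw [if_neg hemp]
    rw [PySem.List.foldl_append_eq_flatMap
      (fun page => (PySem.Dict.ofList u).getD page [])
      (PySem.List.sorted (PySem.Dict.ofList u).keys (fun k => k) false) []]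
    rw [List.nil_append]
    rw [pvBodyA, ← pvBodyB]
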